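-- pv_equiv track=rewrite | github.com/veyru/encryption | encryption_system.py | recursive_fractal
-- ===== SOURCE A (Python) =====
-- def recursive_fractal(data, depth=5):
--     if depth == 0:
--         return data
--     new_data = []
--     for byte in data:
--         new_data.append(byte)
--         new_data.append(byte ^ 0xFF)  # XOR with 0xFF for variation
--     return recursive_fractal(new_data, depth - 1)
-- ===== SOURCE B (Python) =====
-- def recursive_fractal(data, depth=5):
--     result = data
--     for _ in range(depth):
--         result = [v for b in result for v in (b, b ^ 0xFF)]
--     return result
-- ===== Notes on version B (the rewrite author's own statement) =====
-- stated objective: simpler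
-- what changed: Replaces the recursion with an iterative loop: one flat-comprehension expansion per level, repeated depth times via range(depth), instead of building new_data with paired appends and recursing.
import Mathlib
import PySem

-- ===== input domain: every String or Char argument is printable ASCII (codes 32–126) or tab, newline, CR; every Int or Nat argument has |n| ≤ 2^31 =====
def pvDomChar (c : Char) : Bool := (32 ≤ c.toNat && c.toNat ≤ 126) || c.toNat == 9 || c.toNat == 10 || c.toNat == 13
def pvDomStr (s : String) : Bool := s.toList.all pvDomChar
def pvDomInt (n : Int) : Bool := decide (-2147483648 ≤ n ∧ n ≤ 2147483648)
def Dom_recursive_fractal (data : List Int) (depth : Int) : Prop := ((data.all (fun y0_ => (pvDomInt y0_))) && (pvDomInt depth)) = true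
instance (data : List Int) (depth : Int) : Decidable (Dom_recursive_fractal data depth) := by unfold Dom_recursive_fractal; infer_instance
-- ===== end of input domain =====

-- B replaces A's recursion with an iterative loop over range(depth), flat-mapping each level;
-- Pre_ excludes negative depth, where Python A never returns (unbounded recursion).
-- ===== PORT A =====
-- the 'for byte in data' loop building new_data by two appends
def pvExpandA (data : List Int) : List Int :=
  data.foldl (fun new_data byte => (new_data ++ [byte]) ++ [PySem.Int.bxor byte 255]) []

-- A's recursion on depth, run with fuel depth.toNat (exact for depth ≥ 0, i.e. on Pre_)
def pvRecA (data : List Int) : Nat → List Int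
  | 0 => data
  | n + 1 => pvRecA (pvExpandA data) n

def recursive_fractal (data : List Int) (depth : Int) : List Int :=
  pvRecA data depth.toNat

-- ===== PORT B =====
def recursive_fractal_alt (data : List Int) (depth : Int) : List Int :=
  (PySem.List.pyRange 0 depth 1).foldl
    (fun result _ => result.flatMap (fun b => [b, PySem.Int.bxor b 255])) data

-- ===== PRECONDITION & SPEC =====
-- Pre_ excludes depth < 0: there Python A recurses without bound and never returns a value.
def Pre_recursive_fractal (data : List Int) (depth : Int) : Prop := 0 ≤ depth
instance (data : List Int) (depth : Int) : Decidable (Pre_recursive_fractal data depth) := by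
  unfold Pre_recursive_fractal; infer_instance
def pvWitness_recursive_fractal : List Int × Int := ([1, 2, 3], 2)
def Spec_recursive_fractal (data : List Int) (depth : Int) (out : List Int) : Prop := out = recursive_fractal_alt data depth
instance (data : List Int) (depth : Int) (out : List Int) : Decidable (Spec_recursive_fractal data depth out) := by unfold Spec_recursive_fractal; infer_instance

-- ===== CLAIM (what is proved, stated in full; the proofs are below) =====
def Claim_equal_recursive_fractal : Prop := ∀ (data : List Int) (depth : Int), Dom_recursive_fractal data depth → Pre_recursive_fractal data depth → Spec_recursive_fractal data depth (recursive_fractal data depth)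

-- ===== LEMMAS AND PROOFS =====

-- ===== VERDICT (by name: the statement is the Claim_ definition above) =====
-- one level: A's append-append loop is a flatMap
theorem pvExpandA_eq (data : List Int) :
    pvExpandA data = data.flatMap (fun b => [b, PySem.Int.bxor b 255]) := by
  have h := PySem.List.foldl_append_eq_flatMap (fun b => [b, PySem.Int.bxor b 255]) data ([] : List Int)
  simpa [pvExpandA, List.append_assoc] using h

-- A's fuelled recursion equals n iterated flatMap steps folded over any n-element list
theorem pvRecA_eq_foldl (data : List Int) (n : Nat) (l : List Int) (hl : l.length = n) :
    pvRecA data n = l.foldl (fun result _ => result.flatMap (fun b => [b, PySem.Int.bxor b 255])) data := by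
  induction n generalizing data l with
  | zero => simp [pvRecA, List.length_eq_zero_iff.mp hl]
  | succ n ih =>
    cases l with
    | nil => simp at hl
    | cons x xs =>
      simp only [List.length_cons, Nat.succ.injEq] at hl
      simp only [pvRecA, List.foldl_cons, pvExpandA_eq]
      exact ih _ xs hl

theorem recursive_fractal_spec : Claim_equal_recursive_fractal := by
  intro data depth _ hpre
  unfold Spec_recursive_fractal recursive_fractal recursive_fractal_alt
  exact pvRecA_eq_foldl data depth.toNat (PySem.List.pyRange 0 depth 1)
    (by rw [PySem.List.length_pyRange_one]; omega)
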